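-- pv_equiv track=rewrite | github.com/hypergraphman/Gruppa1EGE24 | task23/4.py | f
-- ===== SOURCE A (Python) =====
-- def f(st, fn, h):
--     if st > fn:
--         return 0
--     if st == fn:
--         return h[-2] == '2'
--     m = [f(st + 1, fn, h + '1'),
--          f(st * 2, fn, h + '2'),
--          f(st * 3, fn, h + '2')]
--     return sum(m)
-- ===== SOURCE B (Python) =====
-- def f(st, fn, h):
--     if st > fn:
--         return 0
--     if st == fn:
--         return h[-2] == '2'
--     total = [1]
--     t2 = [1 if h.endswith('2') else 0]
--     v = st + 1
--     while v <= fn: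
--         d = 0
--         if v % 2 == 0 and v // 2 >= st:
--             d += total[v // 2 - st]
--         if v % 3 == 0 and v // 3 >= st:
--             d += total[v // 3 - st]
--         total.append(total[v - 1 - st] + d)
--         t2.append(d)
--         v += 1
--     ans = t2[fn - 1 - st]
--     if fn % 2 == 0 and fn // 2 >= st:
--         ans += t2[fn // 2 - st]
--     if fn % 3 == 0 and fn // 3 >= st:
--         ans += t2[fn // 3 - st]
--     return ans
-- ===== Notes on version B (the rewrite author's own statement) =====
-- stated objective: alternative
-- what changed: A counts the +1/*2/*3 operation paths by branching recursion that carries the whole history string; B counts them with one forward dynamic-programming sweep over the values st..fn, keeping per value the number of paths and the number of paths whose last operation is a doubling/tripling, plus the last character of h for the length-1 paths. Pre_ excludes st == fn, where A returns a bool (h[-2] == '2') rather than an int, and the inputs where A raises or recurses forever.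
-- outside the precondition, e.g. on f(3, 3, 'ab'): A returns False, B returns False; on f(-1, 0, 'xx'): A does not finish within the time limit, B raises IndexError; on f(2, 4, ''): A raises IndexError, B returns 0
import Mathlib
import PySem

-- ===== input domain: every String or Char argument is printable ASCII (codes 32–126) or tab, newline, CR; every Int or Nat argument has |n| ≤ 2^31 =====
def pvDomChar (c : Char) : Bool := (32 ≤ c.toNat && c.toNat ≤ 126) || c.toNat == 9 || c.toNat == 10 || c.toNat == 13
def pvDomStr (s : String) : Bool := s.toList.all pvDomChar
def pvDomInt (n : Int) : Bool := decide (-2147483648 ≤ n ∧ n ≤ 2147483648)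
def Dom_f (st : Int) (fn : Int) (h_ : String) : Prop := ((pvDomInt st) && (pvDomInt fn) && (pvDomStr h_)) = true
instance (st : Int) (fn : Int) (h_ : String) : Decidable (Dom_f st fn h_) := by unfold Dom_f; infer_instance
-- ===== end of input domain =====

-- B replaces A's branching recursion over operation histories by one forward dynamic-programming
-- sweep over the values st..fn; equivalence is claimed on the inputs where the Python A returns
-- an int (Pre_f below).

-- ===== PORT A =====
-- fuel-based transliteration of A's recursion; the fuel (fn - st).toNat + 1 bounds the recursion
-- depth whenever the Python terminates (each step strictly increases st when 1 ≤ st).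
def fFuel : Nat → Int → Int → List Char → Int
  | 0, _, _, _ => 0
  | fuel + 1, st, fn, h =>
    if st > fn then 0
    else if st = fn then (if PySem.List.pyGet? h (-2) = some '2' then 1 else 0)
    else
      fFuel fuel (st + 1) fn (h ++ ['1']) +
      fFuel fuel (st * 2) fn (h ++ ['2']) +
      fFuel fuel (st * 3) fn (h ++ ['2'])

def f (st : Int) (fn : Int) (h_ : String) : Int :=
  fFuel ((fn - st).toNat + 1) st fn h_.toList

-- ===== PORT B =====
-- the while-loop of Source B: v runs over st+1..fn; total/t2 are the Python lists, ported as Arrays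
-- (Python-list indexing is exact here: Source B's guards keep every index nonnegative and in range)
def dpLoop (st fn : Int) (v : Int) (total t2 : Array Int) : Array Int × Array Int :=
  if hv : v ≤ fn then
    let d := (if PySem.Int.mod v 2 = 0 ∧ st ≤ PySem.Int.floordiv v 2
              then total.getD (PySem.Int.floordiv v 2 - st).toNat 0 else 0)
           + (if PySem.Int.mod v 3 = 0 ∧ st ≤ PySem.Int.floordiv v 3
              then total.getD (PySem.Int.floordiv v 3 - st).toNat 0 else 0)
    dpLoop st fn (v + 1) (total.push (total.getD (v - 1 - st).toNat 0 + d)) (t2.push d)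
  else (total, t2)
termination_by (fn + 1 - v).toNat
decreasing_by omega

def f_alt (st : Int) (fn : Int) (h_ : String) : Int :=
  if st > fn then 0
  else if st = fn then (if PySem.List.pyGet? h_.toList (-2) = some '2' then 1 else 0)
  else
    let r := dpLoop st fn (st + 1) #[1] #[if PySem.Str.endswith h_ "2" then 1 else 0]
    r.2.getD (fn - 1 - st).toNat 0
    + (if PySem.Int.mod fn 2 = 0 ∧ st ≤ PySem.Int.floordiv fn 2
       then r.2.getD (PySem.Int.floordiv fn 2 - st).toNat 0 else 0)
    + (if PySem.Int.mod fn 3 = 0 ∧ st ≤ PySem.Int.floordiv fn 3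
       then r.2.getD (PySem.Int.floordiv fn 3 - st).toNat 0 else 0)

-- ===== PRECONDITION & SPEC =====
-- Pre_f = exactly the inputs on which the Python A returns an int: for st < fn A terminates only
-- when 1 ≤ st (otherwise the *2/*3 branches never move towards fn and recursion is unbounded), and
-- h[-2] must exist at the depth-1 nodes reaching st == fn (IndexError when h = '' and fn is a
-- direct successor of st).  Pre_f excludes st = fn, where A returns the bool h[-2] == '2' (or
-- raises IndexError for len(h) < 2) instead of an int.
def Pre_f (st : Int) (fn : Int) (h_ : String) : Prop :=
  fn < st
  ∨ (1 ≤ st ∧ st < fn ∧ (h_.toList ≠ [] ∨ (fn ≠ st + 1 ∧ fn ≠ 2 * st ∧ fn ≠ 3 * st)))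

instance (st : Int) (fn : Int) (h_ : String) : Decidable (Pre_f st fn h_) := by
  unfold Pre_f; infer_instance

def pvWitness_f : Int × Int × String := (1, 10, "")

def Spec_f (st : Int) (fn : Int) (h_ : String) (out : Int) : Prop := out = f_alt st fn h_
instance (st : Int) (fn : Int) (h_ : String) (out : Int) : Decidable (Spec_f st fn h_ out) := by
  unfold Spec_f; infer_instance

-- ===== CLAIM (what is proved, stated in full; the proofs are below) =====
def Claim_equal_f : Prop := ∀ (st : Int) (fn : Int) (h_ : String), Dom_f st fn h_ → Pre_f st fn h_ → Spec_f st fn h_ (f st fn h_)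

-- ===== LEMMAS AND PROOFS =====

-- number of op-sequences (+1, *2, *3) leading from u to v
def Paths (u v : Int) : Int :=
  if u = v then 1
  else if v < u ∨ u < 1 then 0
  else Paths (u + 1) v + Paths (2 * u) v + Paths (3 * u) v
termination_by (v - u).toNat
decreasing_by all_goals omega

-- number of such sequences from u to v (length ≥ 1) whose last op is *2 or *3
def E2v (u v : Int) : Int :=
  (if (2 : Int) ∣ v then Paths u (v / 2) else 0) +
  (if (3 : Int) ∣ v then Paths u (v / 3) else 0)

-- t2-table semantics: at the start u the "empty path" carries the flag b
def T2v (u b v : Int) : Int := if v = u then b else E2v u v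

-- the value A computes for st < fn, as a function of the last-character flag b of h
def Ssum (st fn b : Int) : Int :=
  T2v st b (fn - 1)
  + (if (2 : Int) ∣ fn then T2v st b (fn / 2) else 0)
  + (if (3 : Int) ∣ fn then T2v st b (fn / 3) else 0)

def b1 (h : List Char) : Int := if h.getLast? = some '2' then 1 else 0

theorem Paths_eq (u v : Int) : Paths u v =
    if u = v then 1
    else if v < u ∨ u < 1 then 0
    else Paths (u + 1) v + Paths (2 * u) v + Paths (3 * u) v := by
  rw [Paths]

theorem Paths_zero {u v : Int} (h : v < u) : Paths u v = 0 := by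
  rw [Paths_eq]; rw [if_neg (by omega), if_pos (by omega)]

theorem Paths_self (u : Int) : Paths u u = 1 := by
  rw [Paths_eq]; simp

-- first-move recurrence, valid for every target q
theorem Paths_first (u q : Int) (hu : 1 ≤ u) :
    Paths u q = (if q = u then 1 else 0) + (Paths (u + 1) q + Paths (2 * u) q + Paths (3 * u) q) := by
  by_cases h : q = u
  · subst h
    rw [Paths_self, Paths_zero (by omega), Paths_zero (by omega), Paths_zero (by omega)]
    simp
  · rw [Paths_eq, if_neg (fun hh => h hh.symm)]
    by_cases h2 : q < u
    · rw [if_pos (by omega), if_neg h, Paths_zero (by omega), Paths_zero (by omega),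
        Paths_zero (by omega)]
      simp
    · rw [if_neg (by omega), if_neg h]; ring

theorem E2v_lt {u v : Int} (hu : 1 ≤ u) (hv : v ≤ u) : E2v u v = 0 := by
  unfold E2v
  have h2 : (2 : Int) ∣ v → Paths u (v / 2) = 0 := fun hd => Paths_zero (by omega)
  have h3 : (3 : Int) ∣ v → Paths u (v / 3) = 0 := fun hd => Paths_zero (by omega)
  split_ifs with d2 d3 d3 <;> simp [h2, h3, d2, d3]

-- child expansion of E2v
theorem E2v_step (st p : Int) (hst : 1 ≤ st) :
    E2v st p = E2v (st + 1) p + E2v (2 * st) p + E2v (3 * st) p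
      + (if p = 2 * st then 1 else 0) + (if p = 3 * st then 1 else 0) := by
  unfold E2v
  rw [Paths_first st (p / 2) hst, Paths_first st (p / 3) hst]
  by_cases d2 : (2 : Int) ∣ p <;> by_cases d3 : (3 : Int) ∣ p <;>
    simp only [d2, d3, ite_true, ite_false] <;>
    split_ifs <;> first | linarith | (exfalso; omega)

-- pointwise expansion of the t2-table value
theorem T2v_step (st b p : Int) (hst : 1 ≤ st) :
    T2v st b p = (if p = st then b else 0)
      + (T2v (st + 1) 0 p + (T2v (2 * st) 1 p + T2v (3 * st) 1 p)) := by
  have A1 : T2v (st + 1) 0 p = E2v (st + 1) p := by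
    by_cases h : p = st + 1
    · subst h; rw [E2v_lt (by omega) (by omega)]; simp [T2v]
    · simp [T2v, h]
  have A2 : T2v (2 * st) 1 p = (if p = 2 * st then 1 else 0) + E2v (2 * st) p := by
    by_cases h : p = 2 * st
    · subst h; rw [E2v_lt (by omega) (by omega)]; simp [T2v]
    · simp [T2v, h]
  have A3 : T2v (3 * st) 1 p = (if p = 3 * st then 1 else 0) + E2v (3 * st) p := by
    by_cases h : p = 3 * st
    · subst h; rw [E2v_lt (by omega) (by omega)]; simp [T2v]
    · simp [T2v, h]
  rw [A1, A2, A3]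
  by_cases h : p = st
  · subst h
    rw [E2v_lt (show (1:Int) ≤ p + 1 by omega) (by omega),
      E2v_lt (show (1:Int) ≤ 2 * p by omega) (by omega),
      E2v_lt (show (1:Int) ≤ 3 * p by omega) (by omega)]
    simp only [T2v]
    split_ifs <;> first | linarith | (exfalso; omega)
  · simp only [T2v, if_neg h]
    rw [E2v_step st p hst]
    split_ifs <;> first | linarith | (exfalso; omega)

-- last-move recurrence (the DP recurrence), by strong induction
theorem Paths_last : ∀ (n : Nat) (st v : Int), (v - st).toNat ≤ n → 1 ≤ st → st < v →
    Paths st v = Paths st (v - 1) + E2v st v := by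
  intro n
  induction n with
  | zero => intro st v h h1 h2; omega
  | succ n ih =>
    intro st v hm h1 h2
    have key : ∀ c, st < c →
        Paths c (v - 1) + E2v c v + (if c = v then 1 else 0) = Paths c v := by
      intro c hc
      rcases lt_trichotomy c v with h | h | h
      · rw [if_neg (by omega), add_zero, ← ih c v (by omega) (by omega) h]
      · subst h
        rw [Paths_zero (by omega), E2v_lt (by omega) (le_refl _), Paths_self, if_pos rfl]
        ring
      · rw [Paths_zero (by omega), Paths_zero (by omega), E2v_lt (by omega) (by omega),
          if_neg (by omega)]
        ring
    rw [Paths_first st v h1, Paths_first st (v - 1) h1, E2v_step st v h1,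
      ← key (st + 1) (by omega), ← key (2 * st) (by omega), ← key (3 * st) (by omega)]
    split_ifs <;> first | linarith | (exfalso; omega)

theorem Ssum_ge {c fn b : Int} (hfn : 2 ≤ fn) (hc : fn ≤ c) : Ssum c fn b = 0 := by
  have hz1 : E2v c (fn - 1) = 0 := E2v_lt (by omega) (by omega)
  have hz2 : E2v c (fn / 2) = 0 := E2v_lt (by omega) (by omega)
  have hz3 : E2v c (fn / 3) = 0 := E2v_lt (by omega) (by omega)
  unfold Ssum T2v
  rw [hz1, hz2, hz3]
  split_ifs <;> first | linarith | (exfalso; omega)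

theorem Ssum_step (st fn b : Int) (hst : 1 ≤ st) (hlt : st < fn) :
    Ssum st fn b = ((if st + 1 = fn then b else 0) + (if st * 2 = fn then b else 0)
      + (if st * 3 = fn then b else 0))
      + (Ssum (st + 1) fn 0 + (Ssum (st * 2) fn 1 + Ssum (st * 3) fn 1)) := by
  have c2 : st * 2 = 2 * st := by ring
  have c3 : st * 3 = 3 * st := by ring
  rw [c2, c3]
  unfold Ssum
  rw [T2v_step st b (fn - 1) hst, T2v_step st b (fn / 2) hst, T2v_step st b (fn / 3) hst]
  by_cases d2 : (2 : Int) ∣ fn <;> by_cases d3 : (3 : Int) ∣ fn <;>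
    simp only [d2, d3, ite_true, ite_false] <;>
    split_ifs <;> first | linarith | (exfalso; omega)

theorem fFuel_gt {k : Nat} {st fn : Int} {h : List Char} (hlt : fn < st) : fFuel k st fn h = 0 := by
  cases k <;> simp [fFuel, hlt]

theorem fFuel_self {k : Nat} {fn : Int} (h : List Char) (hk : 1 ≤ k) :
    fFuel k fn fn h = (if PySem.List.pyGet? h (-2) = some '2' then 1 else 0) := by
  cases k with
  | zero => omega
  | succ k => simp [fFuel]

theorem pyGet_neg2_append (h : List Char) (c : Char) :
    PySem.List.pyGet? (h ++ [c]) (-2) = h.getLast? := by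
  rcases List.eq_nil_or_concat h with rfl | ⟨t, x, rfl⟩
  · simp [PySem.List.pyGet?, PySem.List.pyIdx?]
  · simp only [List.concat_eq_append]
    have h1 : 1 ≤ (t ++ [x]).length := by simp
    rw [show (-2 : Int) = -((2 : Nat) : Int) from by norm_num,
      PySem.List.pyGet?_neg_natCast ((t ++ [x]) ++ [c]) 2 (by omega) (by simp),
      List.getElem?_append_left (by simp), List.getLast?_eq_getElem?]
    congr 1
    simp

theorem b1_append (h : List Char) (c : Char) : b1 (h ++ [c]) = (if c = '2' then 1 else 0) := by
  simp [b1]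

-- MAIN characterization of A's recursion for st < fn
theorem fFuel_main : ∀ (n : Nat) (st fn : Int) (h : List Char) (fuel : Nat),
    (fn - st).toNat ≤ n → (fn - st).toNat < fuel → 1 ≤ st → st < fn →
    fFuel fuel st fn h = Ssum st fn (b1 h) := by
  intro n
  induction n with
  | zero => intro st fn h fuel h0 _ _ _; omega
  | succ n ih =>
    intro st fn h fuel hn hf h1 h2
    cases fuel with
    | zero => omega
    | succ k =>
      have child : ∀ c (ch : Char), st < c → fFuel k c fn (h ++ [ch]) =
          (if c = fn then b1 h else 0) + Ssum c fn (if ch = '2' then 1 else 0) := by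
        intro c ch hc
        rcases lt_trichotomy c fn with hlt | heq | hgt
        · rw [ih c fn (h ++ [ch]) k (by omega) (by omega) (by omega) hlt, b1_append,
            if_neg (show ¬ (c = fn) by omega), zero_add]
        · rw [heq, fFuel_self _ (show 1 ≤ k by omega), pyGet_neg2_append, if_pos rfl,
            Ssum_ge (show (2 : Int) ≤ fn by omega) (le_refl fn), add_zero]
          rfl
        · rw [fFuel_gt hgt, if_neg (show ¬ (c = fn) by omega),
            Ssum_ge (show (2 : Int) ≤ fn by omega) (show fn ≤ c by omega)]
          ring
      simp only [fFuel, if_neg (show ¬ st > fn by omega), if_neg (show ¬ st = fn by omega)]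
      rw [child (st + 1) '1' (by omega), child (st * 2) '2' (by omega),
        child (st * 3) '2' (by omega), Ssum_step st fn (b1 h) h1 h2,
        show (if ('1' : Char) = '2' then (1 : Int) else 0) = 0 from by decide,
        show (if ('2' : Char) = '2' then (1 : Int) else 0) = 1 from by decide]
      ring

-- reading an element of a (pyRange-map)-shaped Python list
theorem listGetD_map_pyRange (f : Int → Int) (a b w : Int) (h1 : a ≤ w) (h2 : w < b) :
    ((PySem.List.pyRange a b 1).map f).getD (w - a).toNat 0 = f w := by
  rw [List.getD_eq_getElem?_getD, List.getElem?_map, PySem.List.getElem?_pyRange_one,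
    if_pos (by omega)]
  simp only [Option.map_some, Option.getD_some]
  congr 1
  omega

theorem arrayGetD_toList (a : Array Int) (i : Nat) (d : Int) : a.getD i d = a.toList.getD i d := by
  rw [Array.getD_eq_getD_getElem?, List.getD_eq_getElem?_getD, Array.getElem?_toList]

-- DP invariant for B's loop
theorem dpLoop_inv : ∀ (n : Nat) (st fn v b : Int) (total t2 : Array Int),
    (fn + 1 - v).toNat = n → 1 ≤ st → st < v → v ≤ fn + 1 →
    total.toList = (PySem.List.pyRange st v 1).map (fun u => Paths st u) →
    t2.toList = (PySem.List.pyRange st v 1).map (fun u => T2v st b u) →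
    (dpLoop st fn v total t2).1.toList = (PySem.List.pyRange st (fn + 1) 1).map (fun u => Paths st u) ∧
    (dpLoop st fn v total t2).2.toList = (PySem.List.pyRange st (fn + 1) 1).map (fun u => T2v st b u) := by
  intro n
  induction n with
  | zero =>
    intro st fn v b total t2 hn hst hv hvf htot ht2
    rw [dpLoop, dif_neg (show ¬ v ≤ fn by omega)]
    have : v = fn + 1 := by omega
    rw [this] at htot ht2
    exact ⟨htot, ht2⟩
  | succ n ih =>
    intro st fn v b total t2 hn hst hv hvf htot ht2
    by_cases hvfn : v ≤ fn
    · rw [dpLoop, dif_pos hvfn]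
      have hget : ∀ w : Int, st ≤ w → w < v → total.getD (w - st).toNat 0 = Paths st w := by
        intro w hw1 hw2
        rw [arrayGetD_toList, htot, listGetD_map_pyRange _ st v w hw1 hw2]
      have hd : ((if PySem.Int.mod v 2 = 0 ∧ st ≤ PySem.Int.floordiv v 2
              then total.getD (PySem.Int.floordiv v 2 - st).toNat 0 else 0)
           + (if PySem.Int.mod v 3 = 0 ∧ st ≤ PySem.Int.floordiv v 3
              then total.getD (PySem.Int.floordiv v 3 - st).toNat 0 else 0)) = E2v st v := by
        rw [PySem.Int.floordiv_eq_ediv_of_pos (show (0:Int) < 2 by norm_num),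
          PySem.Int.floordiv_eq_ediv_of_pos (show (0:Int) < 3 by norm_num)]
        simp only [PySem.Int.mod_eq_zero_iff_dvd]
        unfold E2v
        have e2 : (if (2:Int) ∣ v ∧ st ≤ v / 2 then total.getD (v / 2 - st).toNat 0 else 0)
            = (if (2:Int) ∣ v then Paths st (v / 2) else 0) := by
          by_cases d2 : (2:Int) ∣ v
          · by_cases hr : st ≤ v / 2
            · rw [if_pos ⟨d2, hr⟩, if_pos d2, hget (v / 2) hr (by omega)]
            · rw [if_neg (by tauto), if_pos d2, Paths_zero (by omega)]
          · rw [if_neg (by tauto), if_neg d2]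
        have e3 : (if (3:Int) ∣ v ∧ st ≤ v / 3 then total.getD (v / 3 - st).toNat 0 else 0)
            = (if (3:Int) ∣ v then Paths st (v / 3) else 0) := by
          by_cases d3 : (3:Int) ∣ v
          · by_cases hr : st ≤ v / 3
            · rw [if_pos ⟨d3, hr⟩, if_pos d3, hget (v / 3) hr (by omega)]
            · rw [if_neg (by tauto), if_pos d3, Paths_zero (by omega)]
          · rw [if_neg (by tauto), if_neg d3]
        rw [e2, e3]
      have hlast : total.getD (v - 1 - st).toNat 0 = Paths st (v - 1) := by
        have := hget (v - 1) (by omega) (by omega)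
        rwa [show v - 1 - st = v - 1 - st from rfl] at this
      rw [hd, hlast]
      have hnew : Paths st (v - 1) + E2v st v = Paths st v :=
        (Paths_last (v - st).toNat st v (le_refl _) hst (by omega)).symm
      have htot' : (total.push (Paths st (v - 1) + E2v st v)).toList
          = (PySem.List.pyRange st (v + 1) 1).map (fun u => Paths st u) := by
        rw [Array.toList_push, htot, PySem.List.pyRange_one_succ_right (by omega),
          List.map_append, List.map_singleton, hnew]
      have ht2' : (t2.push (E2v st v)).toList
          = (PySem.List.pyRange st (v + 1) 1).map (fun u => T2v st b u) := by
        rw [Array.toList_push, ht2, PySem.List.pyRange_one_succ_right (by omega),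
          List.map_append, List.map_singleton]
        simp only [T2v, if_neg (show ¬ v = st by omega)]
      exact ih st fn (v + 1) b _ _ (by omega) hst (by omega) (by omega) htot' ht2'
    · omega

theorem endswith_b1 (h_ : String) :
    (if PySem.Str.endswith h_ "2" then (1 : Int) else 0) = b1 h_.toList := by
  have e : PySem.Str.endswith h_ "2" = true ↔ h_.toList.getLast? = some '2' := by
    rw [PySem.Str.endswith_eq, PySem.Chars.endswith_iff,
      show ("2" : String).toList = ['2'] from rfl]
    rw [List.getLast?_eq_some_iff]
    constructor
    · rintro ⟨t, ht⟩; exact ⟨t, ht.symm⟩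
    · rintro ⟨t, ht⟩; exact ⟨t, ht.symm⟩
  unfold b1
  by_cases h : PySem.Str.endswith h_ "2" = true
  · rw [if_pos h, if_pos (e.mp h)]
  · rw [if_neg h, if_neg (fun hh => h (e.mpr hh))]

theorem f_alt_lt (st fn : Int) (h_ : String) (hst : 1 ≤ st) (hlt : st < fn) :
    f_alt st fn h_ = Ssum st fn (b1 h_.toList) := by
  unfold f_alt
  rw [if_neg (by omega), if_neg (by omega)]
  set b : Int := if PySem.Str.endswith h_ "2" then 1 else 0 with hb
  have hbb : b = b1 h_.toList := endswith_b1 h_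
  have htot0 : (#[(1:Int)] : Array Int).toList
      = (PySem.List.pyRange st (st + 1) 1).map (fun u => Paths st u) := by
    rw [PySem.List.pyRange_one_singleton, List.map_singleton, Paths_self]
  have ht20 : (#[b] : Array Int).toList
      = (PySem.List.pyRange st (st + 1) 1).map (fun u => T2v st b u) := by
    rw [PySem.List.pyRange_one_singleton, List.map_singleton]
    simp [T2v]
  obtain ⟨_, H2⟩ := dpLoop_inv (fn - st).toNat st fn (st + 1) b #[1] #[b]
    (by omega) hst (by omega) (by omega) htot0 ht20
  have hget : ∀ w : Int, st ≤ w → w < fn + 1 →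
      (dpLoop st fn (st + 1) #[1] #[b]).2.getD (w - st).toNat 0 = T2v st b w := by
    intro w hw1 hw2
    rw [arrayGetD_toList, H2, listGetD_map_pyRange _ st (fn + 1) w hw1 hw2]
  rw [PySem.Int.floordiv_eq_ediv_of_pos (show (0:Int) < 2 by norm_num),
    PySem.Int.floordiv_eq_ediv_of_pos (show (0:Int) < 3 by norm_num)]
  simp only [PySem.Int.mod_eq_zero_iff_dvd]
  unfold Ssum
  rw [show fn - 1 - st = fn - 1 - st from rfl, hget (fn - 1) (by omega) (by omega)]
  have e2 : (if (2:Int) ∣ fn ∧ st ≤ fn / 2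
        then (dpLoop st fn (st + 1) #[1] #[b]).2.getD (fn / 2 - st).toNat 0 else 0)
      = (if (2:Int) ∣ fn then T2v st b (fn / 2) else 0) := by
    by_cases d2 : (2:Int) ∣ fn
    · by_cases hr : st ≤ fn / 2
      · rw [if_pos ⟨d2, hr⟩, if_pos d2, hget (fn / 2) hr (by omega)]
      · rw [if_neg (by tauto), if_pos d2]
        simp only [T2v, if_neg (show ¬ fn / 2 = st by omega)]
        rw [E2v_lt (by omega) (by omega)]
    · rw [if_neg (by tauto), if_neg d2]
  have e3 : (if (3:Int) ∣ fn ∧ st ≤ fn / 3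
        then (dpLoop st fn (st + 1) #[1] #[b]).2.getD (fn / 3 - st).toNat 0 else 0)
      = (if (3:Int) ∣ fn then T2v st b (fn / 3) else 0) := by
    by_cases d3 : (3:Int) ∣ fn
    · by_cases hr : st ≤ fn / 3
      · rw [if_pos ⟨d3, hr⟩, if_pos d3, hget (fn / 3) hr (by omega)]
      · rw [if_neg (by tauto), if_pos d3]
        simp only [T2v, if_neg (show ¬ fn / 3 = st by omega)]
        rw [E2v_lt (by omega) (by omega)]
    · rw [if_neg (by tauto), if_neg d3]
  rw [e2, e3, hbb]

-- ===== VERDICT (by name: the statement is the Claim_ definition above) =====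
theorem f_spec : Claim_equal_f := by
  intro st fn h_ _hd hpre
  unfold Spec_f
  rcases hpre with hgt | ⟨hst, hlt, _⟩
  · unfold f f_alt
    rw [fFuel_gt hgt, if_pos (by omega)]
  · have hA : f st fn h_ = Ssum st fn (b1 h_.toList) := by
      unfold f
      exact fFuel_main ((fn - st).toNat) st fn _ _ le_rfl (by omega) hst hlt
    rw [hA, f_alt_lt st fn h_ hst hlt]
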